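-- pv_equiv track=rewrite | github.com/cutehammond772/problem-solving-archive | 백준/Gold/2800. 괄호 제거/괄호 제거.py | solve
-- ===== SOURCE A (Python) =====
-- def solve(S):
-- 	stack, brackets = [], []
-- 	result = []
--
-- 	# 괄호 찾기
-- 	for x in range(len(S)):
-- 		if S[x] == '(':
-- 			stack.append(x)
--
-- 		if S[x] == ')':
-- 			brackets.append((stack.pop(), x))
--
-- 	for bit in range(1, 1 << len(brackets)):
-- 		sequence = [*S]
--
-- 		for x in range(len(brackets)):
-- 			if (1 << x) & bit:
-- 				p, q = brackets[x]
-- 				sequence[p] = sequence[q] = ''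
--
-- 		result.append(''.join(sequence))
--
-- 	# ((?))인 경우, 같은 형태의 식이 두 개 이상 나올 수 있다.
-- 	result = [*set(result)]
-- 	result.sort()
--
-- 	return result
-- ===== SOURCE B (Python) =====
-- def solve(S):
-- 	# stack-based matching, then build all removal variants by doubling:
-- 	# each pair doubles the list of variants (keep it / blank it), then
-- 	# drop the untouched original, dedup and sort.
-- 	stack, pairs = [], []
-- 	for i, c in enumerate(S):
-- 		if c == '(':
-- 			stack.append(i)
-- 		elif c == ')':
-- 			pairs.append((stack.pop(), i))
--
-- 	outs = [list(S)]
-- 	for p, q in pairs: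
-- 		blanked = []
-- 		for seq in outs:
-- 			t = seq[:]
-- 			t[p] = t[q] = ''
-- 			blanked.append(t)
-- 		outs = outs + blanked
--
-- 	return sorted(set(''.join(t) for t in outs) - {S})
-- ===== Notes on version B (the rewrite author's own statement) =====
-- stated objective: alternative
-- what changed: A rebuilds the whole character list from scratch for every bitmask in range(1, 2**n) and re-scans all n bracket pairs per mask; B instead doubles a list of variants once per matched pair (keep it / blank it), then drops the untouched original string and applies the same set-dedup + sort.
import Mathlib
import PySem

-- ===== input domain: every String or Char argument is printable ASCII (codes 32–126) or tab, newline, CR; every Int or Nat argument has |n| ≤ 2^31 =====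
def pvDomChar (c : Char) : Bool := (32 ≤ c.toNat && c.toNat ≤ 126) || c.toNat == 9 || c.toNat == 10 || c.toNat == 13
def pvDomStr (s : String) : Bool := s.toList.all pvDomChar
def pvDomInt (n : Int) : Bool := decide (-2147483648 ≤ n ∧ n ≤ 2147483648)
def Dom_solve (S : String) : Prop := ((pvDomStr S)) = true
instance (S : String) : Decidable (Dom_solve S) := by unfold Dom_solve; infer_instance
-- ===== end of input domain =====

-- B replaces A's per-bitmask rebuild (one pass over all pairs for each of the 2^n masks)
-- by doubling a list of variants once per matched pair; same return value, different decomposition.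

-- ===== PORT A =====
def solve (S : String) : List String :=
  match
    (PySem.List.pyRange 0 (PySem.Str.len S) 1).foldl
      (fun st x =>
        match st with
        | none => none
        | some (stack, brackets) =>
          let stack := if PySem.List.pyGetD S.toList x ' ' = '(' then stack ++ [x] else stack
          if PySem.List.pyGetD S.toList x ' ' = ')' then
            match PySem.List.pop? stack with        -- stack.pop(): none = IndexError
            | none => none
            | some (p, stack') => some (stack', brackets ++ [(p, x)])
          else some (stack, brackets))
      (some (([] : List Int), ([] : List (Int × Int))))
  with
  | none => []  -- unreachable under Pre_solve (a ')' with no matching '(' raises in Python)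
  | some (_, brackets) =>
    PySem.List.sorted
      (PySem.Set.ofList
        ((PySem.List.pyRange 1 ((1 : Int) <<< brackets.length) 1).foldl
          (fun result bit =>
            result ++ [PySem.Str.join ""
              ((PySem.List.pyRange 0 (PySem.List.len brackets) 1).foldl
                (fun sequence x =>
                  -- (1 << x) & bit: x ≥ 0 here, so 1 << x is (1 : Int) <<< x.toNat
                  if PySem.Int.band ((1 : Int) <<< x.toNat) bit ≠ 0 then
                    PySem.List.pySetD
                      (PySem.List.pySetD sequence (PySem.List.pyGetD brackets x (0, 0)).1 "")
                      (PySem.List.pyGetD brackets x (0, 0)).2 ""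
                  else sequence)
                (S.toList.map (fun c => String.ofList [c])))]) []))    -- [*S] as 1-char strings
      (fun x => x)    -- [*set(result)]; result.sort()

-- ===== PORT B =====
def solve_alt (S : String) : List String :=
  match
    (PySem.List.enumerate S.toList).foldl
      (fun st ic =>
        match st with
        | none => none
        | some (stack, pairs) =>
          if ic.2 = '(' then some (stack ++ [ic.1], pairs)
          else if ic.2 = ')' then
            match PySem.List.pop? stack with        -- stack.pop(): none = IndexError
            | none => none
            | some (p, stack') => some (stack', pairs ++ [(p, ic.1)])
          else some (stack, pairs))
      (some (([] : List Int), ([] : List (Int × Int))))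
  with
  | none => []  -- unreachable under Pre_solve
  | some (_, pairs) =>
    PySem.List.sorted
      (PySem.Set.diff
        (PySem.Set.ofList
          ((pairs.foldl
              (fun outs pq =>
                let blanked := outs.foldl
                  (fun acc seq =>
                    acc ++ [PySem.List.pySetD (PySem.List.pySetD seq pq.1 "") pq.2 ""]) []
                outs ++ blanked)
              [S.toList.map (fun c => String.ofList [c])]).map
            (fun t => PySem.Str.join "" t)))
        (PySem.Set.ofList [S]))
      (fun x => x)

-- ===== PRECONDITION & SPEC =====
-- Pre_solve excludes exactly the strings with a ')' before any matching '(' — there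
-- A's stack.pop() raises IndexError (returns no value), and B raises the same way.
def Pre_solve (S : String) : Prop :=
  ∀ i : Nat, i ≤ S.toList.length →
    (S.toList.take i).count ')' ≤ (S.toList.take i).count '('
instance (S : String) : Decidable (Pre_solve S) := by unfold Pre_solve; infer_instance
def pvWitness_solve : String := "(a)"

def Spec_solve (S : String) (out : List String) : Prop := out = solve_alt S
instance (S : String) (out : List String) : Decidable (Spec_solve S out) := by unfold Spec_solve; infer_instance

-- ===== CLAIM (what is proved, stated in full; the proofs are below) =====
def Claim_equal_solve : Prop := ∀ (S : String), Dom_solve S → Pre_solve S → Spec_solve S (solve S)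

-- ===== LEMMAS AND PROOFS =====

-- proof-only abbreviations (not used by the ports)
def pvBlank (pq : Int × Int) (seq : List String) : List String :=
  PySem.List.pySetD (PySem.List.pySetD seq pq.1 "") pq.2 ""

def pvStep (st : Option (List Int × List (Int × Int))) (ic : Int × Char) :
    Option (List Int × List (Int × Int)) :=
  match st with
  | none => none
  | some (stack, pairs) =>
    if ic.2 = '(' then some (stack ++ [ic.1], pairs)
    else if ic.2 = ')' then
      match PySem.List.pop? stack with
      | none => none
      | some (p, stack') => some (stack', pairs ++ [(p, ic.1)])
    else some (stack, pairs)

-- blanking pairs LSB-first: bit x of m decides whether pair x is blanked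
def pvMask : List (Int × Int) → Nat → List String → List String
  | [], _, seq => seq
  | pq :: rest, m, seq => pvMask rest (m / 2) (if m % 2 = 1 then pvBlank pq seq else seq)

def pvF (pairs : List (Int × Int)) (cs : List Char) (m : Nat) : String :=
  PySem.Str.join "" (pvMask pairs m (cs.map (fun c => String.ofList [c])))

-- The two scanning loops compute the same thing.
theorem pv_scan_eq (S : String) :
    (PySem.List.pyRange 0 (PySem.Str.len S) 1).foldl
      (fun st x =>
        match st with
        | none => none
        | some (stack, brackets) =>
          let stack := if PySem.List.pyGetD S.toList x ' ' = '(' then stack ++ [x] else stack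
          if PySem.List.pyGetD S.toList x ' ' = ')' then
            match PySem.List.pop? stack with
            | none => none
            | some (p, stack') => some (stack', brackets ++ [(p, x)])
          else some (stack, brackets))
      (some (([] : List Int), ([] : List (Int × Int))))
    = (PySem.List.enumerate S.toList).foldl pvStep
        (some (([] : List Int), ([] : List (Int × Int)))) := by
  rw [PySem.List.enumerate_eq_map_pyRange S.toList ' ', List.foldl_map,
    PySem.Str.len_eq, ← PySem.List.len_eq]
  apply PySem.List.foldl_congr_mem
  intro acc x _
  rcases acc with _ | ⟨stack, brackets⟩
  · rfl
  · by_cases h1 : PySem.List.pyGetD S.toList x ' ' = '('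
    · have h2 : ¬(PySem.List.pyGetD S.toList x ' ' = ')') := by
        rw [h1]; decide
      simp [pvStep, h1]
    · by_cases h2 : PySem.List.pyGetD S.toList x ' ' = ')'
      · simp [pvStep, h2]
      · simp [pvStep, h1, h2]

theorem pv_scan_go (rest : List Char) (a : Nat) (stack : List Int) (pairs : List (Int × Int))
    (hst : ∀ s ∈ stack, 0 ≤ s)
    (h : ∀ i, i ≤ rest.length →
      (rest.take i).count ')' ≤ stack.length + (rest.take i).count '(') :
    ∃ st' pr',
      (PySem.List.enumerate rest (a : Int)).foldl pvStep (some (stack, pairs)) = some (st', pr') ∧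
      ∀ pq ∈ pr', pq ∈ pairs ∨ (0 ≤ pq.1 ∧ 0 ≤ pq.2 ∧ pq.2 < (a : Int) + rest.length) := by
  induction rest generalizing a stack pairs with
  | nil => exact ⟨stack, pairs, by simp [PySem.List.enumerate_nil], fun pq hpq => Or.inl hpq⟩
  | cons c r ih =>
    rw [PySem.List.enumerate_cons, List.foldl_cons]
    have hcast : (a : Int) + 1 = ((a + 1 : Nat) : Int) := by push_cast; ring
    by_cases h1 : c = '('
    · subst h1
      have hstep : pvStep (some (stack, pairs)) ((a : Int), '(')
          = some (stack ++ [(a : Int)], pairs) := by simp [pvStep]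
      rw [hstep, hcast]
      obtain ⟨st', pr', heq, hb⟩ := ih (a + 1) (stack ++ [(a : Int)]) pairs
        (by intro s hs
            rcases List.mem_append.mp hs with hs | hs
            · exact hst s hs
            · simp at hs; omega)
        (by intro i hi
            have hh := h (i + 1) (by simpa using hi)
            simp only [List.take_succ_cons, List.count_cons] at hh
            simp at hh
            have hlen : (stack ++ [(a : Int)]).length = stack.length + 1 := by simp
            rw [hlen]
            omega)
      refine ⟨st', pr', heq, fun pq hpq => ?_⟩
      rcases hb pq hpq with hc | hc
      · exact Or.inl hc
      · refine Or.inr ⟨hc.1, hc.2.1, ?_⟩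
        have h3 := hc.2.2
        simp only [List.length_cons]
        push_cast at h3 ⊢
        omega
    · by_cases h2 : c = ')'
      · subst h2
        have hne : stack ≠ [] := by
          intro hcon
          have hh := h 1 (by simp)
          rw [hcon] at hh
          simp at hh
        rcases List.eq_nil_or_concat stack with hnil | ⟨xs, x, hx⟩
        · exact absurd hnil hne
        · subst hx
          have hstep : pvStep (some (xs.concat x, pairs)) ((a : Int), ')')
              = some (xs, pairs ++ [(x, (a : Int))]) := by
            simp only [List.concat_eq_append]
            simp [pvStep, PySem.List.pop?_last]
          rw [hstep, hcast]
          have hst' : ∀ s ∈ xs, 0 ≤ s := fun s hs => hst s (by simp [List.concat_eq_append, hs])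
          have hh' : ∀ i, i ≤ r.length →
              (r.take i).count ')' ≤ xs.length + (r.take i).count '(' := by
            intro i hi
            have hh := h (i + 1) (by simpa using hi)
            simp only [List.take_succ_cons, List.count_cons] at hh
            simp only [List.concat_eq_append, List.length_append, List.length_cons,
              List.length_nil] at hh
            simp at hh
            omega
          obtain ⟨st', pr', heq, hb⟩ := ih (a + 1) xs (pairs ++ [(x, (a : Int))]) hst' hh'
          refine ⟨st', pr', heq, fun pq hpq => ?_⟩
          rcases hb pq hpq with hc | hc
          · rcases List.mem_append.mp hc with hc2 | hc2
            · exact Or.inl hc2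
            · simp at hc2
              subst hc2
              have hxs : 0 ≤ x := hst x (by simp [List.concat_eq_append])
              refine Or.inr ⟨hxs, by simp, ?_⟩
              simp only [List.length_cons]
              push_cast
              omega
          · refine Or.inr ⟨hc.1, hc.2.1, ?_⟩
            have h3 := hc.2.2
            simp only [List.length_cons]
            push_cast at h3 ⊢
            omega
      · have hstep : pvStep (some (stack, pairs)) ((a : Int), c) = some (stack, pairs) := by
          simp [pvStep, h1, h2]
        rw [hstep, hcast]
        obtain ⟨st', pr', heq, hb⟩ := ih (a + 1) stack pairs hst
          (by intro i hi
              have hh := h (i + 1) (by simpa using hi)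
              simp only [List.take_succ_cons, List.count_cons] at hh
              have e1 : (c == ')') = false := by simp [h2]
              have e2 : (c == '(') = false := by simp [h1]
              rw [e1, e2] at hh
              simp at hh
              omega)
        refine ⟨st', pr', heq, fun pq hpq => ?_⟩
        rcases hb pq hpq with hc | hc
        · exact Or.inl hc
        · refine Or.inr ⟨hc.1, hc.2.1, ?_⟩
          have h3 := hc.2.2
          simp only [List.length_cons]
          push_cast at h3 ⊢
          omega

theorem pv_scan_some (S : String) (h : Pre_solve S) :
    ∃ st' pr',
      (PySem.List.enumerate S.toList).foldl pvStep
        (some (([] : List Int), ([] : List (Int × Int)))) = some (st', pr') ∧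
      ∀ pq ∈ pr', 0 ≤ pq.1 ∧ 0 ≤ pq.2 ∧ pq.2 < (S.toList.length : Int) := by
  obtain ⟨st', pr', heq, hb⟩ := pv_scan_go S.toList 0 [] [] (by simp)
    (by intro i hi; simpa using h i hi)
  refine ⟨st', pr', by simpa using heq, fun pq hpq => ?_⟩
  rcases hb pq hpq with hc | hc
  · simp at hc
  · simpa using hc


-- bitmask semantics of A's inner loop
theorem pv_band_test (k m : Nat) :
    (PySem.Int.band ((1 : Int) <<< ((k : Nat) : Int)) ((m : Nat) : Int) ≠ 0) ↔ ((m >>> k) % 2 = 1) := by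
  have hp : 0 < 2 ^ k := Nat.two_pow_pos k
  rw [Int.one_shiftLeft, PySem.Int.band_natCast, Nat.land_comm, Nat.and_two_pow,
    Nat.testBit_eq_decide_div_mod_eq, Nat.shiftRight_eq_div_pow]
  by_cases hd : m / 2 ^ k % 2 = 1
  · simp only [hd, decide_true, Bool.toNat_true, one_mul, ne_eq, Int.natCast_eq_zero, iff_true]
    omega
  · simp only [hd, decide_false, Bool.toNat_false, zero_mul, Nat.cast_zero, ne_eq,
      not_true_eq_false]

theorem pv_mask_enum (rest : List (Int × Int)) (a m : Nat) (seq : List String) :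
    (PySem.List.enumerate rest (a : Int)).foldl
      (fun seq p =>
        if PySem.Int.band ((1 : Int) <<< p.1.toNat) (m : Int) ≠ 0 then pvBlank p.2 seq else seq)
      seq
    = pvMask rest (m >>> a) seq := by
  induction rest generalizing a seq with
  | nil => simp [PySem.List.enumerate_nil, pvMask]
  | cons pq r ih =>
    rw [PySem.List.enumerate_cons, List.foldl_cons]
    have hc1 : (a : Int) + 1 = ((a + 1 : Nat) : Int) := by push_cast; ring
    have hsh : m >>> (a + 1) = (m >>> a) / 2 := Nat.shiftRight_succ m a
    simp only [Int.toNat_natCast]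
    by_cases hc : (m >>> a) % 2 = 1
    · rw [if_pos ((pv_band_test a m).mpr hc), hc1, ih (a + 1)]
      conv_rhs => rw [pvMask]
      rw [if_pos hc, hsh]
    · rw [if_neg (fun hb => hc ((pv_band_test a m).mp hb)), hc1, ih (a + 1)]
      conv_rhs => rw [pvMask]
      rw [if_neg hc, hsh]

theorem pv_inner (pairs : List (Int × Int)) (bit : Int) (hbit : 0 ≤ bit) (seq : List String) :
    (PySem.List.pyRange 0 (PySem.List.len pairs) 1).foldl
      (fun sequence x =>
        if PySem.Int.band ((1 : Int) <<< x.toNat) bit ≠ 0 then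
          PySem.List.pySetD
            (PySem.List.pySetD sequence (PySem.List.pyGetD pairs x (0, 0)).1 "")
            (PySem.List.pyGetD pairs x (0, 0)).2 ""
        else sequence)
      seq
    = pvMask pairs bit.toNat seq := by
  have hb : bit = ((bit.toNat : Nat) : Int) := (Int.toNat_of_nonneg hbit).symm
  have hmain := pv_mask_enum pairs 0 bit.toNat seq
  rw [Nat.shiftRight_zero] at hmain
  simp only [Nat.cast_zero] at hmain
  rw [PySem.List.enumerate_eq_map_pyRange pairs ((0 : Int), (0 : Int)), List.foldl_map] at hmain
  conv_lhs => rw [hb]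
  exact hmain

theorem pv_A_list (cs : List Char) (pairs : List (Int × Int)) :
    (PySem.List.pyRange 1 ((1 : Int) <<< pairs.length) 1).foldl
      (fun result bit =>
        result ++ [PySem.Str.join ""
          ((PySem.List.pyRange 0 (PySem.List.len pairs) 1).foldl
            (fun sequence x =>
              if PySem.Int.band ((1 : Int) <<< x.toNat) bit ≠ 0 then
                PySem.List.pySetD
                  (PySem.List.pySetD sequence (PySem.List.pyGetD pairs x (0, 0)).1 "")
                  (PySem.List.pyGetD pairs x (0, 0)).2 ""
              else sequence)
            (cs.map (fun c => String.ofList [c])))]) []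
    = (List.range (2 ^ pairs.length - 1)).map (fun k => pvF pairs cs (k + 1)) := by
  rw [PySem.List.foldl_append_singleton_eq_map, List.nil_append]
  rw [List.map_congr_left (g := fun bit => pvF pairs cs bit.toNat)
    (fun bit hbit => by
      have h1 : (1 : Int) ≤ bit := (PySem.List.mem_pyRange_one.mp hbit).1
      exact congrArg _ (pv_inner pairs bit (by omega) _))]
  rw [PySem.List.pyRange_one, List.map_map]
  have hM : (((1 : Int) <<< pairs.length) - 1).toNat = 2 ^ pairs.length - 1 := by
    rw [Int.shiftLeft_eq, one_mul,
      show ((2 : Int) ^ pairs.length) = ((2 ^ pairs.length : Nat) : Int) by push_cast; rfl]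
    omega
  rw [hM]
  apply List.map_congr_left
  intro k _
  show pvF pairs cs ((1 + (k : Int)).toNat) = pvF pairs cs (k + 1)
  congr 1
  omega

-- B's doubling loop in closed form
theorem pv_flatMap_single {α β : Type} (l : List α) (g : α → β) :
    l.flatMap (fun x => [g x]) = l.map g := by
  induction l with
  | nil => rfl
  | cons x t ih => simp [ih]

theorem pv_range_double {α : Type} (t : Nat) (f : Nat → List α) :
    (List.range (2 * t)).flatMap f
      = (List.range t).flatMap (fun b => f (2 * b) ++ f (2 * b + 1)) := by
  induction t with
  | zero => simp
  | succ t ih =>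
    rw [show 2 * (t + 1) = (2 * t + 1) + 1 by ring, List.range_succ, List.range_succ,
      List.flatMap_append, List.flatMap_append, ih, List.range_succ, List.flatMap_append]
    simp [List.append_assoc]

theorem pv_double' (pairs : List (Int × Int)) (init : List (List String)) :
    pairs.foldl (fun outs pq => outs ++ outs.map (pvBlank pq)) init
      = (List.range (2 ^ pairs.length)).flatMap (fun m => init.map (pvMask pairs m)) := by
  induction pairs generalizing init with
  | nil =>
    simp only [List.length_nil, pow_zero, List.range_one, List.flatMap_cons, List.flatMap_nil,
      List.append_nil, List.foldl_nil]
    have hmap : List.map (pvMask [] 0) init = List.map id init :=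
      List.map_congr_left (fun x _ => rfl)
    rw [hmap, List.map_id]
  | cons pq r ih =>
    rw [List.foldl_cons, ih, List.length_cons,
      show 2 ^ (r.length + 1) = 2 * 2 ^ r.length by ring, pv_range_double]
    have hfn : ∀ b : Nat,
        (init ++ init.map (pvBlank pq)).map (pvMask r b)
          = init.map (pvMask (pq :: r) (2 * b)) ++ init.map (pvMask (pq :: r) (2 * b + 1)) := by
      intro b
      rw [List.map_append, List.map_map]
      congr 1
      · apply List.map_congr_left
        intro x _
        conv_rhs => rw [pvMask]
        rw [if_neg (by omega), show 2 * b / 2 = b by omega]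
      · apply List.map_congr_left
        intro x _
        show pvMask r b (pvBlank pq x) = pvMask (pq :: r) (2 * b + 1) x
        conv_rhs => rw [pvMask]
        rw [if_pos (by omega), show (2 * b + 1) / 2 = b by omega]
    exact congrArg (fun f => List.flatMap f (List.range (2 ^ r.length))) (funext hfn)

theorem pv_double (pairs : List (Int × Int)) (init : List (List String)) :
    pairs.foldl
      (fun outs pq =>
        let blanked := outs.foldl
          (fun acc seq =>
            acc ++ [PySem.List.pySetD (PySem.List.pySetD seq pq.1 "") pq.2 ""]) []
        outs ++ blanked)
      init
      = (List.range (2 ^ pairs.length)).flatMap (fun m => init.map (pvMask pairs m)) := by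
  rw [show (fun (outs : List (List String)) (pq : Int × Int) =>
      outs ++ outs.foldl
        (fun acc seq =>
          acc ++ [PySem.List.pySetD (PySem.List.pySetD seq pq.1 "") pq.2 ""]) [])
      = fun outs pq => outs ++ outs.map (pvBlank pq) from funext (fun outs => funext (fun pq => by
        rw [PySem.List.foldl_append_singleton_eq_map, List.nil_append]; rfl))]
  exact pv_double' pairs init

-- joining
theorem pv_join_flatten (ps : List (List Char)) : PySem.Chars.join [] ps = ps.flatten := by
  induction ps with
  | nil => simp [PySem.Chars.join_nil]
  | cons p t ih =>
    cases t with
    | nil => simp [PySem.Chars.join_singleton]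
    | cons q r =>
      rw [PySem.Chars.join_cons_cons, ih]
      simp

theorem pv_mask_zero (pairs : List (Int × Int)) (seq : List String) :
    pvMask pairs 0 seq = seq := by
  induction pairs with
  | nil => rfl
  | cons pq r ih => rw [pvMask]; simpa using ih

theorem pv_join_base (cs : List Char) :
    PySem.Str.join "" (cs.map (fun c => String.ofList [c])) = String.ofList cs := by
  rw [← String.toList_inj, PySem.Str.toList_join, List.map_map]
  have hmap : List.map (String.toList ∘ fun c => String.ofList [c]) cs
      = List.map (fun c => [c]) cs :=
    List.map_congr_left (fun c _ => String.toList_ofList)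
  rw [hmap]
  exact (PySem.Chars.join_nil_singletons cs).trans String.toList_ofList.symm

theorem pv_B_strs (cs : List Char) (pairs : List (Int × Int)) :
    ((List.range (2 ^ pairs.length)).flatMap
        (fun m => [cs.map (fun c => String.ofList [c])].map (pvMask pairs m))).map
      (fun t => PySem.Str.join "" t)
    = String.ofList cs :: (List.range (2 ^ pairs.length - 1)).map (fun k => pvF pairs cs (k + 1)) := by
  simp only [List.map_cons, List.map_nil]
  rw [pv_flatMap_single, List.map_map,
    show 2 ^ pairs.length = (2 ^ pairs.length - 1) + 1 by
      have := Nat.one_le_two_pow (n := pairs.length); omega,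
    List.range_succ_eq_map]
  simp only [List.map_cons, List.map_map]
  congr 1
  · show PySem.Str.join "" (pvMask pairs 0 _) = String.ofList cs
    rw [pv_mask_zero]
    exact pv_join_base cs

-- the blanked variants are strictly shorter than S
theorem pv_mem_set_self (xs : List String) (j : Nat) (v : String) (h : v ∈ xs ∨ j < xs.length) :
    v ∈ xs.set j v := by
  by_cases hj : j < xs.length
  · have hj' : j < (xs.set j v).length := by rw [List.length_set]; exact hj
    have hg : (xs.set j v)[j] = v := List.getElem_set_self hj'
    have hm := List.getElem_mem hj'
    rw [hg] at hm
    exact hm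
  · rw [List.set_eq_of_length_le (by omega)]
    rcases h with h | h
    · exact h
    · omega

theorem pv_mem_blank_pres (pq : Int × Int) (seq : List String)
    (hp : 0 ≤ pq.1) (hq : 0 ≤ pq.2) (h : "" ∈ seq) : "" ∈ pvBlank pq seq := by
  unfold pvBlank
  rw [PySem.List.pySetD_of_nonneg _ _ hq, PySem.List.pySetD_of_nonneg _ _ hp]
  exact pv_mem_set_self _ _ _ (Or.inl (pv_mem_set_self _ _ _ (Or.inl h)))

theorem pv_mem_blank_new (pq : Int × Int) (seq : List String)
    (hp : 0 ≤ pq.1) (hq : 0 ≤ pq.2) (hqlt : pq.2 < (seq.length : Int)) :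
    "" ∈ pvBlank pq seq := by
  unfold pvBlank
  rw [PySem.List.pySetD_of_nonneg _ _ hq, PySem.List.pySetD_of_nonneg _ _ hp]
  apply pv_mem_set_self _ _ _ (Or.inr ?_)
  rw [List.length_set]
  omega

theorem pv_mask_pres (pairs : List (Int × Int)) (m : Nat) (seq : List String)
    (hbnd : ∀ pq ∈ pairs, 0 ≤ pq.1 ∧ 0 ≤ pq.2) (h : "" ∈ seq) : "" ∈ pvMask pairs m seq := by
  induction pairs generalizing m seq with
  | nil => exact h
  | cons pq r ih =>
    rw [pvMask]
    apply ih _ _ (fun x hx => hbnd x (List.mem_cons_of_mem _ hx))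
    by_cases hc : m % 2 = 1
    · rw [if_pos hc]
      exact pv_mem_blank_pres pq seq (hbnd pq (List.mem_cons_self)).1 (hbnd pq (List.mem_cons_self)).2 h
    · rw [if_neg hc]; exact h

theorem pv_mask_empty (pairs : List (Int × Int)) (m : Nat) (seq : List String)
    (hm : 1 ≤ m) (hlt : m < 2 ^ pairs.length)
    (hbnd : ∀ pq ∈ pairs, 0 ≤ pq.1 ∧ 0 ≤ pq.2 ∧ pq.2 < (seq.length : Int)) :
    "" ∈ pvMask pairs m seq := by
  induction pairs generalizing m seq with
  | nil => simp at hlt; omega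
  | cons pq r ih =>
    rw [pvMask]
    by_cases hc : m % 2 = 1
    · rw [if_pos hc]
      apply pv_mask_pres _ _ _ (fun x hx =>
        ⟨(hbnd x (List.mem_cons_of_mem _ hx)).1, (hbnd x (List.mem_cons_of_mem _ hx)).2.1⟩)
      exact pv_mem_blank_new pq seq (hbnd pq List.mem_cons_self).1
        (hbnd pq List.mem_cons_self).2.1 (hbnd pq List.mem_cons_self).2.2

    · rw [if_neg hc]
      have h2 : 2 ^ (r.length + 1) = 2 * 2 ^ r.length := by ring
      rw [List.length_cons] at hlt
      exact ih (m / 2) seq (by omega) (by omega)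
        (fun x hx => hbnd x (List.mem_cons_of_mem _ hx))

theorem pv_len_mask (pairs : List (Int × Int)) (m : Nat) (seq : List String) :
    (pvMask pairs m seq).length = seq.length := by
  induction pairs generalizing m seq with
  | nil => rfl
  | cons pq r ih =>
    rw [pvMask, ih]
    by_cases hc : m % 2 = 1
    · rw [if_pos hc]; unfold pvBlank; simp [PySem.List.length_pySetD]
    · rw [if_neg hc]

theorem pv_mask_short (pairs : List (Int × Int)) (m : Nat) (seq : List String)
    (hbnd : ∀ pq ∈ pairs, 0 ≤ pq.1 ∧ 0 ≤ pq.2)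
    (h : ∀ t ∈ seq, t.toList.length ≤ 1) : ∀ t ∈ pvMask pairs m seq, t.toList.length ≤ 1 := by
  induction pairs generalizing m seq with
  | nil => exact h
  | cons pq r ih =>
    rw [pvMask]
    apply ih _ _ (fun x hx => hbnd x (List.mem_cons_of_mem _ hx))
    by_cases hc : m % 2 = 1
    · rw [if_pos hc]
      intro t ht
      unfold pvBlank at ht
      rw [PySem.List.pySetD_of_nonneg _ _ (hbnd pq List.mem_cons_self).2,
        PySem.List.pySetD_of_nonneg _ _ (hbnd pq List.mem_cons_self).1] at ht
      rcases List.mem_or_eq_of_mem_set ht with ht | ht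
      · rcases List.mem_or_eq_of_mem_set ht with ht | ht
        · exact h t ht
        · subst ht; simp
      · subst ht; simp
    · rw [if_neg hc]; exact h

theorem pv_join_lt (seq : List String)
    (h1 : ∀ t ∈ seq, t.toList.length ≤ 1) (h2 : "" ∈ seq) :
    (PySem.Str.join "" seq).toList.length < seq.length := by
  rw [PySem.Str.toList_join, show ("" : String).toList = [] from rfl, pv_join_flatten,
    List.length_flatten]
  obtain ⟨l1, l2, hsplit⟩ := List.append_of_mem h2
  subst hsplit
  have b1 : ((l1.map String.toList).map List.length).sum ≤ l1.length := by
    have hb := List.sum_le_card_nsmul ((l1.map String.toList).map List.length) 1 ?_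
    · simpa using hb
    · intro x hx
      simp only [List.map_map, List.mem_map] at hx
      obtain ⟨t, ht, rfl⟩ := hx
      exact h1 t (by simp [ht])
  have b2 : ((l2.map String.toList).map List.length).sum ≤ l2.length := by
    have hb := List.sum_le_card_nsmul ((l2.map String.toList).map List.length) 1 ?_
    · simpa using hb
    · intro x hx
      simp only [List.map_map, List.mem_map] at hx
      obtain ⟨t, ht, rfl⟩ := hx
      exact h1 t (by simp [ht])
  simp only [List.map_append, List.map_cons, List.sum_append, List.sum_cons, List.length_append,
    List.length_cons]
  simp only [show (("" : String).toList).length = 0 from rfl]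
  omega

theorem pv_not_S (cs : List Char) (pairs : List (Int × Int))
    (hbnd : ∀ pq ∈ pairs, 0 ≤ pq.1 ∧ 0 ≤ pq.2 ∧ pq.2 < (cs.length : Int))
    (m : Nat) (hm : 1 ≤ m) (hlt : m < 2 ^ pairs.length) :
    pvF pairs cs m ≠ String.ofList cs := by
  intro hEq
  have hbase : (cs.map (fun c => String.ofList [c])).length = cs.length := by simp
  have hb1 : ∀ t ∈ cs.map (fun c => String.ofList [c]), t.toList.length ≤ 1 := by
    intro t ht
    simp only [List.mem_map] at ht
    obtain ⟨c, _, rfl⟩ := ht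
    simp [String.toList_ofList]
  have hemp := pv_mask_empty pairs m (cs.map (fun c => String.ofList [c])) hm hlt
    (by rw [hbase]; exact hbnd)
  have hshort := pv_mask_short pairs m (cs.map (fun c => String.ofList [c]))
    (fun pq hpq => ⟨(hbnd pq hpq).1, (hbnd pq hpq).2.1⟩) hb1
  have hlen := pv_join_lt (pvMask pairs m (cs.map (fun c => String.ofList [c]))) hshort hemp
  rw [pv_len_mask, hbase] at hlen
  have hlen' : (pvF pairs cs m).toList.length < cs.length := by
    unfold pvF
    exact hlen
  have hcg : (pvF pairs cs m).toList.length = cs.length := by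
    rw [hEq, String.toList_ofList]
  omega

-- dedup + sort agree
theorem pv_final (S : String) (L : List String) (hS : S ∉ L) :
    PySem.List.sorted
      (PySem.Set.diff (PySem.Set.ofList (S :: L)) (PySem.Set.ofList [S])) (fun x => x)
    = PySem.List.sorted (PySem.Set.ofList L) (fun x => x) := by
  apply PySem.List.sorted_eq_sorted_of_perm _ _ _ Function.injective_id
  refine (List.perm_ext_iff_of_nodup
    (PySem.Set.nodup_diff _ _ (PySem.Set.nodup_ofList _)) (PySem.Set.nodup_ofList L)).mpr ?_
  intro y
  rw [PySem.Set.mem_diff]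
  simp only [PySem.Set.mem_ofList, List.mem_cons, List.not_mem_nil, or_false]
  constructor
  · rintro ⟨hy | hy, hne⟩
    · exact absurd hy hne
    · exact hy
  · intro hy
    exact ⟨Or.inr hy, fun hc => hS (hc ▸ hy)⟩

-- ===== VERDICT (by name: the statement is the Claim_ definition above) =====
theorem solve_spec : Claim_equal_solve := by
  intro S _ hPre
  unfold Spec_solve
  obtain ⟨st', pr', hscan, hbnd⟩ := pv_scan_some S hPre
  -- reduce A
  have eA : (PySem.List.pyRange 0 (PySem.Str.len S) 1).foldl
      (fun st x =>
        match st with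
        | none => none
        | some (stack, brackets) =>
          let stack := if PySem.List.pyGetD S.toList x ' ' = '(' then stack ++ [x] else stack
          if PySem.List.pyGetD S.toList x ' ' = ')' then
            match PySem.List.pop? stack with
            | none => none
            | some (p, stack') => some (stack', brackets ++ [(p, x)])
          else some (stack, brackets))
      (some (([] : List Int), ([] : List (Int × Int)))) = some (st', pr') := by
    rw [pv_scan_eq S]; exact hscan
  have eB : (PySem.List.enumerate S.toList).foldl
      (fun st ic =>
        match st with
        | none => none
        | some (stack, pairs) =>
          if ic.2 = '(' then some (stack ++ [ic.1], pairs)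
          else if ic.2 = ')' then
            match PySem.List.pop? stack with
            | none => none
            | some (p, stack') => some (stack', pairs ++ [(p, ic.1)])
          else some (stack, pairs))
      (some (([] : List Int), ([] : List (Int × Int)))) = some (st', pr') := hscan
  unfold solve solve_alt
  rw [eA, eB]
  dsimp only
  rw [pv_A_list S.toList pr', pv_double pr' [S.toList.map (fun c => String.ofList [c])]]
  rw [pv_B_strs S.toList pr']
  rw [String.ofList_toList]
  rw [pv_final S _ ?hns]
  case hns =>
    intro hmem
    rw [List.mem_map] at hmem
    obtain ⟨k, hk, hEq⟩ := hmem
    rw [List.mem_range] at hk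
    refine pv_not_S S.toList pr' hbnd (k + 1) (by omega)
      (by have := Nat.one_le_two_pow (n := pr'.length); omega) ?_
    rw [hEq, String.ofList_toList]
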